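-- pv_equiv track=rewrite | github.com/gracerlane/school | SPQ23/CPSC 3400/hw1/hw1.py | createFollowsDict
-- ===== SOURCE A (Python) =====
-- def createFollowsDict(pairs, letter):
-- 	alpha = "abcdefghijklmnopqrstuvwxyz"       # declares the alphabet
-- 	follow = {}                                # dictionary for following letters
-- 	for i in alpha:                            # for the letters in the alphabet
-- 		if letter + i in pairs:                  # if there is a match
-- 			follow[i] = pairs[letter + i]
-- 		else:
-- 			follow[i] = 0
-- 	return follow
-- ===== SOURCE B (Python) =====
-- def createFollowsDict(pairs, letter):
-- 	alpha = "abcdefghijklmnopqrstuvwxyz"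
-- 	follow = {c: 0 for c in alpha}             # seed every letter with 0
-- 	for key, val in pairs.items():             # scan the pairs dict once
-- 		if len(key) == len(letter) + 1 and key[:-1] == letter and key[-1] in alpha:
-- 			follow[key[-1]] = val
-- 	return follow
-- ===== Notes on version B (the rewrite author's own statement) =====
-- stated objective: alternative
-- what changed: B seeds all 26 counts with 0 and makes one filtering pass over pairs.items() (keys of the form letter+<alphabet char>), instead of A's probe of the pairs dict for each of the 26 alphabet letters.
import Mathlib
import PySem

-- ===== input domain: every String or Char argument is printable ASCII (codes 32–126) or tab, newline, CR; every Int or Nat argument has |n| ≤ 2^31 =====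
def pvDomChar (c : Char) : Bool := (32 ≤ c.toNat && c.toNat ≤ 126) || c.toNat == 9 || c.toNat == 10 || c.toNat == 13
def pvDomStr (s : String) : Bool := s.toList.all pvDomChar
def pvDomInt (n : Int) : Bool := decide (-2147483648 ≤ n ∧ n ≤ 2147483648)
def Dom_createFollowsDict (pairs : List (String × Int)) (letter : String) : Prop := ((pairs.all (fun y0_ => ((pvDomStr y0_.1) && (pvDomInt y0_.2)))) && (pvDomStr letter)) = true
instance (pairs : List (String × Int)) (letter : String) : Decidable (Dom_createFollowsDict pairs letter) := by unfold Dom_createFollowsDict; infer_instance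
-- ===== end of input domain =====

-- B seeds all 26 counts with 0 and makes one filtering pass over pairs.items(), instead of A's 26 probes of the pairs dict; alternative decomposition, equal value.

-- ===== PORT A =====
-- loop body of A: if letter + i in pairs: follow[i] = pairs[letter+i] else follow[i] = 0
def pvStepA (d : PySem.Dict String Int) (letter : String) (follow : PySem.Dict String Int) (i : Char) : PySem.Dict String Int :=
  if d.contains (letter ++ String.ofList [i]) then
    follow.insert (String.ofList [i]) (d.getD (letter ++ String.ofList [i]) 0)
  else
    follow.insert (String.ofList [i]) 0

def createFollowsDict (pairs : List (String × Int)) (letter : String) : List (String × Int) :=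
  -- alpha = "abcdefghijklmnopqrstuvwxyz"; the dict parameter is the assoc list wrapped as a PySem.Dict
  ("abcdefghijklmnopqrstuvwxyz".toList.foldl (pvStepA (PySem.Dict.mk pairs) letter) PySem.Dict.empty).items

-- ===== PORT B =====
-- loop body of B: if len(key) == len(letter)+1 and key[:-1] == letter and key[-1] in alpha: follow[key[-1]] = val
-- (the three short-circuit 'and's become nested ifs; key[-1] can only be evaluated with len(key) ≥ 1, so the none arm is unreachable)
def pvStepB (alpha : String) (letter : String) (d : PySem.Dict String Int) (kv : String × Int) : PySem.Dict String Int :=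
  if PySem.Str.len kv.1 == PySem.Str.len letter + 1 then
    if PySem.Str.slice kv.1 none (some (-1)) == letter then
      match PySem.Str.pyGet? kv.1 (-1) with
      | some c =>
        if PySem.Str.isIn (String.ofList [c]) alpha then
          d.insert (String.ofList [c]) kv.2
        else d
      | none => d
    else d
  else d

def createFollowsDict_alt (pairs : List (String × Int)) (letter : String) : List (String × Int) :=
  -- follow = {c: 0 for c in alpha}, then one pass over pairs.items()
  (pairs.foldl (pvStepB "abcdefghijklmnopqrstuvwxyz" letter)
    ("abcdefghijklmnopqrstuvwxyz".toList.foldl (fun d c => d.insert (String.ofList [c]) (0 : Int)) PySem.Dict.empty)).items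

-- ===== PRECONDITION & SPEC =====
-- Pre_ excludes association lists with duplicate keys: they do not represent a Python dict (dict
-- construction collapses them), and on such lists A's port reads the first and B's port the last entry.
def Pre_createFollowsDict (pairs : List (String × Int)) (letter : String) : Prop :=
  (pairs.map Prod.fst).Nodup
instance (pairs : List (String × Int)) (letter : String) : Decidable (Pre_createFollowsDict pairs letter) := by unfold Pre_createFollowsDict; infer_instance
def pvWitness_createFollowsDict : (List (String × Int)) × String := ([("ab", 3), ("ax", 5), ("q", 7)], "a")
def Spec_createFollowsDict (pairs : List (String × Int)) (letter : String) (out : List (String × Int)) : Prop := out = createFollowsDict_alt pairs letter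
instance (pairs : List (String × Int)) (letter : String) (out : List (String × Int)) : Decidable (Spec_createFollowsDict pairs letter out) := by unfold Spec_createFollowsDict; infer_instance

-- ===== CLAIM (what is proved, stated in full; the proofs are below) =====
def Claim_equal_createFollowsDict : Prop := ∀ (pairs : List (String × Int)) (letter : String), Dom_createFollowsDict pairs letter → Pre_createFollowsDict pairs letter → Spec_createFollowsDict pairs letter (createFollowsDict pairs letter)

-- ===== LEMMAS AND PROOFS =====

lemma pv_str_eq_iff (s t : String) : s = t ↔ s.toList = t.toList := by
  constructor
  · intro h; rw [h]
  · intro h; have := congrArg String.ofList h; simpa using this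

lemma pv_mkS_inj {c c' : Char} (h : String.ofList [c] = String.ofList [c']) : c = c' := by
  have := congrArg String.toList h; simpa using this

lemma pv_singleton_infix {c : Char} {l : List Char} : [c] <:+: l ↔ c ∈ l := by
  constructor
  · intro h; exact h.subset (List.mem_singleton_self c)
  · intro h
    obtain ⟨s, t, rfl⟩ := List.append_of_mem h
    exact ⟨s, t, by simp⟩

lemma pv_stepB_match (letter : String) (d : PySem.Dict String Int) (kv : String × Int) (c : Char)
    (hc : c ∈ "abcdefghijklmnopqrstuvwxyz".toList)
    (hk : kv.1.toList = letter.toList ++ [c]) :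
    pvStepB "abcdefghijklmnopqrstuvwxyz" letter d kv = d.insert (String.ofList [c]) kv.2 := by
  have hlen : (PySem.Str.len kv.1 == PySem.Str.len letter + 1) = true := by
    simp [PySem.Str.len_eq, hk]
  have hslice : (PySem.Str.slice kv.1 none (some (-1)) == letter) = true := by
    rw [beq_iff_eq, pv_str_eq_iff, PySem.Str.slice_to_neg_one, hk]
    simp
  have hget : PySem.Str.pyGet? kv.1 (-1) = some c := by
    rw [PySem.Str.pyGet?_eq, PySem.Chars.pyGet?_eq_listPyGet?, PySem.List.pyGet?_neg_one, hk]
    simp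
  have hin : PySem.Str.isIn (String.ofList [c]) "abcdefghijklmnopqrstuvwxyz" = true := by
    rw [PySem.Str.isIn_iff_infix, String.toList_ofList]
    exact pv_singleton_infix.mpr hc
  unfold pvStepB
  rw [if_pos hlen, if_pos hslice, hget]
  show (if PySem.Str.isIn (String.ofList [c]) "abcdefghijklmnopqrstuvwxyz" = true
      then d.insert (String.ofList [c]) kv.2 else d) = d.insert (String.ofList [c]) kv.2
  rw [if_pos hin]

lemma pv_stepB_skip (letter : String) (d : PySem.Dict String Int) (kv : String × Int)
    (h : ∀ c ∈ "abcdefghijklmnopqrstuvwxyz".toList, kv.1.toList ≠ letter.toList ++ [c]) :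
    pvStepB "abcdefghijklmnopqrstuvwxyz" letter d kv = d := by
  by_cases hlen : (PySem.Str.len kv.1 == PySem.Str.len letter + 1) = true
  · by_cases hslice : (PySem.Str.slice kv.1 none (some (-1)) == letter) = true
    · have hlen' : kv.1.toList.length = letter.toList.length + 1 := by
        rw [beq_iff_eq, PySem.Str.len_eq, PySem.Str.len_eq] at hlen
        omega
      have hne : kv.1.toList ≠ [] := by
        intro h0; rw [h0] at hlen'; simp at hlen'
      have hdrop : kv.1.toList.dropLast = letter.toList := by
        rw [beq_iff_eq] at hslice
        have := congrArg String.toList hslice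
        rwa [PySem.Str.slice_to_neg_one] at this
      have hk : kv.1.toList = letter.toList ++ [kv.1.toList.getLast hne] := by
        have h2 := List.dropLast_append_getLast hne
        rw [hdrop] at h2
        exact h2.symm
      have hcnot : kv.1.toList.getLast hne ∉ "abcdefghijklmnopqrstuvwxyz".toList :=
        fun hcm => h _ hcm hk
      have hget : PySem.Str.pyGet? kv.1 (-1) = some (kv.1.toList.getLast hne) := by
        rw [PySem.Str.pyGet?_eq, PySem.Chars.pyGet?_eq_listPyGet?, PySem.List.pyGet?_neg_one,
          List.getLast?_eq_some_getLast hne]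
      have hin : PySem.Str.isIn (String.ofList [kv.1.toList.getLast hne]) "abcdefghijklmnopqrstuvwxyz" = false := by
        rw [Bool.eq_false_iff]
        intro hT
        rw [PySem.Str.isIn_iff_infix, String.toList_ofList] at hT
        exact hcnot (pv_singleton_infix.mp hT)
      unfold pvStepB
      rw [if_pos hlen, if_pos hslice, hget]
      show (if PySem.Str.isIn (String.ofList [kv.1.toList.getLast hne]) "abcdefghijklmnopqrstuvwxyz" = true
          then d.insert (String.ofList [kv.1.toList.getLast hne]) kv.2 else d) = d
      rw [if_neg (by rw [hin]; exact Bool.false_ne_true)]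
    · unfold pvStepB; rw [if_pos hlen, if_neg hslice]
  · unfold pvStepB; rw [if_neg hlen]

lemma pv_B_getD (letter : String) (ps : List (String × Int)) (d : PySem.Dict String Int)
    (c : Char) (hc : c ∈ "abcdefghijklmnopqrstuvwxyz".toList) :
    (ps.foldl (pvStepB "abcdefghijklmnopqrstuvwxyz" letter) d).getD (String.ofList [c]) 0
      = (ps.filter (fun p => p.1 == letter ++ String.ofList [c])).foldl (fun _ p => p.2)
          (d.getD (String.ofList [c]) 0) := by
  induction ps generalizing d with
  | nil => simp
  | cons p ps ih =>
    by_cases hex : ∃ c' ∈ "abcdefghijklmnopqrstuvwxyz".toList, p.1.toList = letter.toList ++ [c']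
    · obtain ⟨c', hc', hk⟩ := hex
      rw [List.foldl_cons, pv_stepB_match letter d p c' hc' hk]
      by_cases hcc : c' = c
      · subst hcc
        have hfilt : (p.1 == letter ++ String.ofList [c']) = true := by
          rw [beq_iff_eq, pv_str_eq_iff, String.toList_append, String.toList_ofList, hk]
        simp only [List.filter_cons]
        rw [if_pos hfilt, List.foldl_cons, ih]
        congr 1
        rw [PySem.Dict.getD_insert, if_pos rfl]
      · have hfilt : ¬((p.1 == letter ++ String.ofList [c]) = true) := by
          rw [beq_iff_eq, pv_str_eq_iff, String.toList_append, String.toList_ofList, hk]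
          intro he
          exact hcc (by simpa using he)
        simp only [List.filter_cons]
        rw [if_neg hfilt, ih]
        congr 1
        rw [PySem.Dict.getD_insert, if_neg]
        intro he
        exact hcc (pv_mkS_inj he).symm
    · push Not at hex
      rw [List.foldl_cons, pv_stepB_skip letter d p hex]
      have hfilt : ¬((p.1 == letter ++ String.ofList [c]) = true) := by
        rw [beq_iff_eq, pv_str_eq_iff, String.toList_append, String.toList_ofList]
        exact hex c hc
      simp only [List.filter_cons]
      rw [if_neg hfilt, ih]

lemma pv_B_keys (letter : String) (ps : List (String × Int)) (d : PySem.Dict String Int)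
    (hk : ∀ c ∈ "abcdefghijklmnopqrstuvwxyz".toList, d.contains (String.ofList [c]) = true) :
    (ps.foldl (pvStepB "abcdefghijklmnopqrstuvwxyz" letter) d).keys = d.keys := by
  induction ps generalizing d with
  | nil => rfl
  | cons p ps ih =>
    by_cases hex : ∃ c' ∈ "abcdefghijklmnopqrstuvwxyz".toList, p.1.toList = letter.toList ++ [c']
    · obtain ⟨c', hc', hkk⟩ := hex
      rw [List.foldl_cons, pv_stepB_match letter d p c' hc' hkk]
      rw [ih _ (fun c hcm => by rw [PySem.Dict.contains_insert]; simp [hk c hcm])]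
      exact PySem.Dict.keys_insert_of_contains d p.2 (hk c' hc')
    · push Not at hex
      rw [List.foldl_cons, pv_stepB_skip letter d p hex]
      exact ih d hk

lemma pv_mkS_map_nodup : ("abcdefghijklmnopqrstuvwxyz".toList.map (fun c => String.ofList [c])).Nodup := by
  refine List.Nodup.map ?_ (by decide)
  intro a b h
  exact pv_mkS_inj h

lemma pv_A_items (pairs : List (String × Int)) (letter : String) :
    createFollowsDict pairs letter
      = "abcdefghijklmnopqrstuvwxyz".toList.map
          (fun c => (String.ofList [c], (PySem.Dict.mk pairs).getD (letter ++ String.ofList [c]) 0)) := by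
  unfold createFollowsDict
  have hstep : pvStepA (PySem.Dict.mk pairs) letter
      = fun follow i => follow.insert (String.ofList [i]) ((PySem.Dict.mk pairs).getD (letter ++ String.ofList [i]) 0) := by
    funext follow i
    unfold pvStepA
    by_cases h : (PySem.Dict.mk pairs).contains (letter ++ String.ofList [i]) = true
    · rw [if_pos h]
    · rw [if_neg h, PySem.Dict.getD_of_not_contains _ _ (Bool.eq_false_iff.mpr h)]
  rw [hstep,
    PySem.Dict.items_foldl_insert_fresh _ (fun i => String.ofList [i])
      (fun i => (PySem.Dict.mk pairs).getD (letter ++ String.ofList [i]) 0) _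
      (fun a _ => rfl) pv_mkS_map_nodup]
  simp [PySem.Dict.empty]

lemma pv_follow0_items :
    ("abcdefghijklmnopqrstuvwxyz".toList.foldl (fun d c => d.insert (String.ofList [c]) (0 : Int)) PySem.Dict.empty).items
      = "abcdefghijklmnopqrstuvwxyz".toList.map (fun c => (String.ofList [c], (0 : Int))) := by
  rw [PySem.Dict.items_foldl_insert_fresh _ (fun c => String.ofList [c]) (fun _ => (0 : Int)) _
    (fun a _ => rfl) pv_mkS_map_nodup]
  simp [PySem.Dict.empty]

lemma pv_follow0_keys :
    ("abcdefghijklmnopqrstuvwxyz".toList.foldl (fun d c => d.insert (String.ofList [c]) (0 : Int)) PySem.Dict.empty).keys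
      = "abcdefghijklmnopqrstuvwxyz".toList.map (fun c => String.ofList [c]) := by
  show (("abcdefghijklmnopqrstuvwxyz".toList.foldl (fun d c => d.insert (String.ofList [c]) (0 : Int)) PySem.Dict.empty).items.map Prod.fst) = _
  rw [pv_follow0_items, List.map_map]
  rfl

lemma pv_follow0_contains (c : Char) (hc : c ∈ "abcdefghijklmnopqrstuvwxyz".toList) :
    ("abcdefghijklmnopqrstuvwxyz".toList.foldl (fun d c => d.insert (String.ofList [c]) (0 : Int)) PySem.Dict.empty).contains (String.ofList [c]) = true := by
  rw [PySem.Dict.contains_iff_mem_keys, pv_follow0_keys]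
  exact List.mem_map_of_mem hc

lemma pv_follow0_getD (c : Char) (hc : c ∈ "abcdefghijklmnopqrstuvwxyz".toList) :
    ("abcdefghijklmnopqrstuvwxyz".toList.foldl (fun d c => d.insert (String.ofList [c]) (0 : Int)) PySem.Dict.empty).getD (String.ofList [c]) 0 = 0 := by
  refine PySem.Dict.getD_of_mem_items _ ?_ ?_ 0
  · rw [pv_follow0_items]
    exact List.mem_map_of_mem hc
  · show (_ : PySem.Dict String Int).keys.Nodup
    rw [pv_follow0_keys]
    exact pv_mkS_map_nodup

lemma pv_first_eq_last (ps : List (String × Int)) (h : (ps.map Prod.fst).Nodup) (k : String) :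
    (PySem.Dict.mk ps).getD k 0 = (ps.filter (fun p => p.1 == k)).foldl (fun _ p => p.2) 0 := by
  induction ps with
  | nil => rfl
  | cons p ps ih =>
    rw [List.map_cons, List.nodup_cons] at h
    by_cases hak : (p.1 == k) = true
    · have hk : p.1 = k := by simpa using hak
      have htail : ps.filter (fun q => q.1 == k) = [] := by
        refine List.filter_eq_nil_iff.mpr ?_
        intro q hq hqk
        exact h.1 (by rw [← hk] at hqk; exact (beq_iff_eq.mp hqk ▸ List.mem_map_of_mem hq))
      simp only [List.filter_cons]
      rw [if_pos hak, htail]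
      rw [PySem.Dict.getD_eq_get?_getD]
      show ((PySem.Dict.mk (p :: ps)).get? k).getD 0 = p.2
      rw [show PySem.Dict.mk (p :: ps) = PySem.Dict.mk ((p.1, p.2) :: ps) by rfl,
        PySem.Dict.get?_mk_cons, if_pos hak]
      rfl
    · simp only [List.filter_cons]
      rw [if_neg hak, ← ih h.2]
      rw [PySem.Dict.getD_eq_get?_getD, PySem.Dict.getD_eq_get?_getD]
      rw [show PySem.Dict.mk (p :: ps) = PySem.Dict.mk ((p.1, p.2) :: ps) by rfl,
        PySem.Dict.get?_mk_cons, if_neg hak]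

-- ===== VERDICT (by name: the statement is the Claim_ definition above) =====
theorem createFollowsDict_spec : Claim_equal_createFollowsDict := by
  intro pairs letter _ hpre
  unfold Spec_createFollowsDict
  rw [pv_A_items]
  unfold createFollowsDict_alt
  have hkeys : (pairs.foldl (pvStepB "abcdefghijklmnopqrstuvwxyz" letter)
      ("abcdefghijklmnopqrstuvwxyz".toList.foldl (fun d c => d.insert (String.ofList [c]) (0 : Int)) PySem.Dict.empty)).keys
      = "abcdefghijklmnopqrstuvwxyz".toList.map (fun c => String.ofList [c]) := by
    rw [pv_B_keys letter pairs _ (fun c hc => pv_follow0_contains c hc)]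
    exact pv_follow0_keys
  rw [PySem.Dict.items_eq_map_keys _ (by rw [hkeys]; exact pv_mkS_map_nodup) 0, hkeys, List.map_map]
  refine List.map_congr_left ?_
  intro c hc
  show (String.ofList [c], (PySem.Dict.mk pairs).getD (letter ++ String.ofList [c]) 0)
      = (String.ofList [c], _)
  congr 1
  rw [pv_B_getD letter pairs _ c hc, pv_follow0_getD c hc, pv_first_eq_last pairs hpre]
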